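-- pv_equiv track=rewrite | github.com/kamalmustafayev07/research-project | run_pipeline.py | _resolve_datasets
-- ===== SOURCE A (Python) =====
-- def _resolve_datasets(value: str) -> list[str]:
--     aliases = {
--         "hotpot": "hotpotqa",
--         "hotpotqa": "hotpotqa",
--         "musique": "musique",
--         "2wiki": "2wikimultihopqa",
--         "2wikimultihop": "2wikimultihopqa",
--         "2wikimultihopqa": "2wikimultihopqa",
--     }
--     requested = value.strip().lower()
--     if requested == "all":
--         return ["hotpotqa", "musique", "2wikimultihopqa"]
--
--     datasets: list[str] = []
--     for part in requested.split(","):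
--         key = aliases.get(part.strip().lower())
--         if key is None:
--             raise ValueError(f"Unsupported dataset '{part.strip()}'.")
--         if key not in datasets:
--             datasets.append(key)
--     if not datasets:
--         raise ValueError("No valid datasets provided.")
--     return datasets
-- ===== SOURCE B (Python) =====
-- def _resolve_datasets(value: str) -> list[str]:
--     aliases = {
--         "hotpot": "hotpotqa",
--         "hotpotqa": "hotpotqa",
--         "musique": "musique",
--         "2wiki": "2wikimultihopqa",
--         "2wikimultihop": "2wikimultihopqa",
--         "2wikimultihopqa": "2wikimultihopqa",
--     }
--     requested = value.strip().lower()
--     if requested == "all":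
--         return ["hotpotqa", "musique", "2wikimultihopqa"]
--
--     parts = [part.strip().lower() for part in requested.split(",")]
--     unknown = [part for part in parts if part not in aliases]
--     if unknown:
--         raise ValueError(f"Unsupported dataset '{unknown[0]}'.")
--     keys = [aliases[part] for part in parts]
--
--     def _uniq(ks: list[str]) -> list[str]:
--         # recursive first-seen dedup: keep the head, drop all its later copies ahead of time
--         if not ks:
--             return []
--         return [ks[0]] + _uniq([k for k in ks[1:] if k != ks[0]])
--
--     datasets = _uniq(keys)
--     if not datasets:
--         raise ValueError("No valid datasets provided.")
--     return datasets
-- ===== Notes on version B (the rewrite author's own statement) =====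
-- stated objective: alternative
-- what changed: A's single fused loop that resolves each part and deduplicates it by scanning the growing result list is replaced by staged comprehensions (normalize all parts, validate all at once, map them through the alias table) followed by a recursive filter-ahead dedup (keep the head, remove its later occurrences, recurse) instead of an accumulator membership check.
import Mathlib
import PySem

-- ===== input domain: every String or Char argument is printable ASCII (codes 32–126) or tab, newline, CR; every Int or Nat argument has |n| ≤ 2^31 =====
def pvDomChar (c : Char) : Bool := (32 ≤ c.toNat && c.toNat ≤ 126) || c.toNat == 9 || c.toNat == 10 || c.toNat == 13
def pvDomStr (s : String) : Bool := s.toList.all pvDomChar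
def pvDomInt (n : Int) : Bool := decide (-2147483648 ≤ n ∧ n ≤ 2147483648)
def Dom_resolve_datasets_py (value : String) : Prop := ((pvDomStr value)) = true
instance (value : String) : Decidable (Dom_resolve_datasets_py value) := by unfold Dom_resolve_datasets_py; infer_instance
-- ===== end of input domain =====

-- B stages A's fused resolve-and-dedup loop into two passes — resolve every part into a keys
-- list, then deduplicate with a recursive filter-ahead algorithm (keep head, drop its later
-- copies, recurse) instead of A's membership scan of the growing result (objective: alternative).

-- ===== PORT A =====
def pvAliasesA : PySem.Dict String String :=
  PySem.Dict.ofList [("hotpot", "hotpotqa"), ("hotpotqa", "hotpotqa"), ("musique", "musique"),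
    ("2wiki", "2wikimultihopqa"), ("2wikimultihop", "2wikimultihopqa"), ("2wikimultihopqa", "2wikimultihopqa")]

def resolve_datasets_py (value : String) : List String :=
  let requested := PySem.Str.lower (PySem.Str.strip value)
  if requested = "all" then ["hotpotqa", "musique", "2wikimultihopqa"]
  else
    ((PySem.Str.split? requested ",").getD []).foldl (fun datasets part =>
      match PySem.Dict.get? pvAliasesA (PySem.Str.lower (PySem.Str.strip part)) with
      | none => datasets   -- Python raises ValueError here; such inputs are outside Pre_
      | some key => if key ∈ datasets then datasets else datasets ++ [key]) []
    -- the final 'if not datasets: raise' is unreachable inside Pre_ (split yields ≥ 1 valid part)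

-- ===== PORT B =====
def pvAliasesB : PySem.Dict String String :=
  PySem.Dict.ofList [("hotpot", "hotpotqa"), ("hotpotqa", "hotpotqa"), ("musique", "musique"),
    ("2wiki", "2wikimultihopqa"), ("2wikimultihop", "2wikimultihopqa"), ("2wikimultihopqa", "2wikimultihopqa")]

-- Source B's _uniq: keep the head, filter all its later occurrences out, recurse on the rest
def pvUniq : List String → List String
  | [] => []
  | k :: rest => k :: pvUniq (rest.filter (fun x => x ≠ k))
termination_by ks => ks.length
decreasing_by
  simp only [List.length_cons, Nat.lt_succ_iff]
  calc (List.filter (fun x => decide (x.1 ≠ k)) rest.attach).unattach.length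
      = (List.filter (fun x => decide (x.1 ≠ k)) rest.attach).length := List.length_unattach ..
    _ ≤ rest.attach.length := List.length_filter_le _ _
    _ = rest.length := List.length_attach ..

def resolve_datasets_py_alt (value : String) : List String :=
  let requested := PySem.Str.lower (PySem.Str.strip value)
  if requested = "all" then ["hotpotqa", "musique", "2wikimultihopqa"]
  else
    -- parts = [part.strip().lower() for part in requested.split(",")]
    let parts := ((PySem.Str.split? requested ",").getD []).map
      (fun part => PySem.Str.lower (PySem.Str.strip part))
    -- the 'unknown' validation raises for a part missing from aliases: outside Pre_, so the
    -- keys comprehension is ported with get? (none = the input A/B raise on, excluded by Pre_)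
    let keys := parts.filterMap (fun part => PySem.Dict.get? pvAliasesB part)
    pvUniq keys
    -- the final 'if not datasets: raise' is unreachable inside Pre_

-- ===== PRECONDITION & SPEC =====
-- Pre_ excludes exactly the inputs on which Python A raises ValueError: some comma part whose
-- stripped form is not an alias key (this also covers the empty input / all-invalid case).
def Pre_resolve_datasets_py (value : String) : Prop :=
  PySem.Str.lower (PySem.Str.strip value) = "all" ∨
  ∀ part ∈ (PySem.Str.split? (PySem.Str.lower (PySem.Str.strip value)) ",").getD [],
    PySem.Str.lower (PySem.Str.strip part) ∈
      (["hotpot", "hotpotqa", "musique", "2wiki", "2wikimultihop", "2wikimultihopqa"] : List String)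
instance (value : String) : Decidable (Pre_resolve_datasets_py value) := by
  unfold Pre_resolve_datasets_py; infer_instance

def pvWitness_resolve_datasets_py : String := "hotpot, MUSIQUE"

def Spec_resolve_datasets_py (value : String) (out : List String) : Prop := out = resolve_datasets_py_alt value
instance (value : String) (out : List String) : Decidable (Spec_resolve_datasets_py value out) := by unfold Spec_resolve_datasets_py; infer_instance

-- ===== CLAIM (what is proved, stated in full; the proofs are below) =====
def Claim_equal_resolve_datasets_py : Prop := ∀ (value : String), Dom_resolve_datasets_py value → Pre_resolve_datasets_py value → Spec_resolve_datasets_py value (resolve_datasets_py value)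

-- ===== LEMMAS AND PROOFS =====

-- A's fused dedup fold from accumulator acc equals acc ++ the filter-ahead dedup of the
-- not-yet-seen keys: the loop invariant connecting the two algorithms.
theorem pv_uniq_nil : pvUniq [] = [] := by
  simp [pvUniq]

theorem pv_uniq_cons (k : String) (rest : List String) :
    pvUniq (k :: rest) = k :: pvUniq (rest.filter (fun x => x ≠ k)) := by
  simp [pvUniq]

theorem pv_foldl_eq_uniq_aux (n : Nat) : ∀ (ks : List String), ks.length ≤ n → ∀ (acc : List String),
    ks.foldl (fun acc k => if k ∈ acc then acc else acc ++ [k]) acc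
      = acc ++ pvUniq (ks.filter (fun k => !acc.contains k)) := by
  induction n with
  | zero =>
    intro ks hks acc
    have : ks = [] := List.eq_nil_of_length_eq_zero (Nat.le_zero.mp hks)
    simp [this, pv_uniq_nil]
  | succ n ih =>
    intro ks hks acc
    cases ks with
    | nil => simp [pv_uniq_nil]
    | cons k t =>
      simp only [List.length_cons, Nat.succ_le_succ_iff] at hks
      by_cases hk : k ∈ acc
      · have hkc : acc.contains k = true := by simpa using hk
        simp only [List.foldl_cons, if_pos hk, List.filter_cons, hkc, Bool.not_true]
        exact ih t hks acc
      · have hkc : acc.contains k = false := by simpa using hk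
        simp only [List.foldl_cons, if_neg hk, List.filter_cons, hkc, Bool.not_false]
        rw [ih t hks (acc ++ [k])]
        simp only [if_pos trivial]
        rw [pv_uniq_cons]
        have hfil : t.filter (fun x => !(acc ++ [k]).contains x)
            = (t.filter (fun x => !acc.contains x)).filter (fun x => x ≠ k) := by
          rw [List.filter_filter]
          apply List.filter_congr
          intro x _
          simp [Bool.and_comm]
        rw [hfil]
        simp

theorem pv_foldl_eq_uniq (ks : List String) (acc : List String) :
    ks.foldl (fun acc k => if k ∈ acc then acc else acc ++ [k]) acc
      = acc ++ pvUniq (ks.filter (fun k => !acc.contains k)) :=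
  pv_foldl_eq_uniq_aux ks.length ks (le_refl _) acc

-- ===== VERDICT (by name: the statement is the Claim_ definition above) =====
theorem resolve_datasets_py_spec : Claim_equal_resolve_datasets_py := by
  intro value _ _
  unfold Spec_resolve_datasets_py resolve_datasets_py resolve_datasets_py_alt
  by_cases h : PySem.Str.lower (PySem.Str.strip value) = "all"
  · simp [h]
  · simp only [h, if_false]
    generalize ((PySem.Str.split? (PySem.Str.lower (PySem.Str.strip value)) ",").getD []) = parts
    -- A's fused loop equals folding the dedup step over the resolved keys (pass 1 = filterMap)
    have hstep : ∀ (acc : List String),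
        parts.foldl (fun datasets part =>
            match pvAliasesA.get? (PySem.Str.lower (PySem.Str.strip part)) with
            | none => datasets
            | some key => if key ∈ datasets then datasets else datasets ++ [key]) acc
          = ((parts.map (fun part => PySem.Str.lower (PySem.Str.strip part))).filterMap
              (fun part => pvAliasesB.get? part)).foldl
              (fun acc k => if k ∈ acc then acc else acc ++ [k]) acc := by
      induction parts with
      | nil => intro acc; simp
      | cons p t ih =>
        intro acc
        have hAB : pvAliasesB.get? (PySem.Str.lower (PySem.Str.strip p))
            = pvAliasesA.get? (PySem.Str.lower (PySem.Str.strip p)) := rfl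
        cases hp : pvAliasesA.get? (PySem.Str.lower (PySem.Str.strip p)) with
        | none =>
          simp only [List.foldl_cons, List.map_cons, List.filterMap_cons, hAB, hp]
          exact ih acc
        | some k =>
          simp only [List.foldl_cons, List.map_cons, List.filterMap_cons, hAB, hp]
          exact ih _
    rw [hstep [], pv_foldl_eq_uniq]
    simp only [List.nil_append, List.contains_nil, Bool.not_false, List.filter_true]
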